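-- pv_equiv track=rewrite | github.com/daniel-reich/ubiquitous-fiesta | eoK63mG5tJDu439nJ_22.py | isWordChain
-- ===== SOURCE A (Python) =====
-- def isWordChain(words):
--     t=0
--
--     def distance(a, b):
--         costs = []
--         for j in range(len(b) + 1):
--             costs.append(j)
--         for i in range(1, len(a) + 1):
--             costs[0] = i
--             nw = i - 1
--             for j in range(1, len(b) + 1):
--                 cj = min(1 + min(costs[j], costs[j - 1]),
--                        nw if a[i - 1] == b[j - 1] else nw + 1)
--                 nw = costs[j]
--                 costs[j] = cj
--
--         return costs[len(b)]
--
--     for i in range(0,len(words)-1):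
--         if distance(words[i],words[i+1])==1:
--             t=t+0
--         else:
--             t=t+1
--     if t==0:
--         return True
--     else:
--         return False
-- ===== SOURCE B (Python) =====
-- def isWordChain(words):
--     def del_one(s, t):
--         # len(s) + 1 == len(t): is s equal to t with exactly one character removed?
--         i = 0
--         while i < len(s) and s[i] == t[i]:
--             i += 1
--         return s[i:] == t[i + 1:]
--
--     def one_edit(a, b):
--         if len(a) == len(b):
--             return sum(1 for x, y in zip(a, b) if x != y) == 1
--         if len(a) + 1 == len(b):
--             return del_one(a, b)
--         if len(b) + 1 == len(a):
--             return del_one(b, a)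
--         return False
--
--     return all(one_edit(a, b) for a, b in zip(words, words[1:]))
-- ===== Notes on version B (the rewrite author's own statement) =====
-- stated objective: faster
-- what changed: Replaces the per-pair Levenshtein dynamic-programming table with a linear one-edit test (equal lengths: count mismatches; lengths off by one: skip common prefix and compare suffixes), folded over adjacent pairs via zip.
import Mathlib
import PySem

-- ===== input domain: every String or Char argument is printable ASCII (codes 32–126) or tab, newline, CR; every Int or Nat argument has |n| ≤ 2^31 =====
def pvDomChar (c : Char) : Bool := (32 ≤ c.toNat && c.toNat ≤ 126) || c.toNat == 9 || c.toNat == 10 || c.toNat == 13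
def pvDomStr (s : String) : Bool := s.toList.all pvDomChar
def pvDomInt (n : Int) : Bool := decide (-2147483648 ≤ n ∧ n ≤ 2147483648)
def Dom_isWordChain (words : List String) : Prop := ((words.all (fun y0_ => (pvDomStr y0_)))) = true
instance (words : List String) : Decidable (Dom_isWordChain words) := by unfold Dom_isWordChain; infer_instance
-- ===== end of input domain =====

-- B replaces the per-pair Levenshtein DP of A with a linear one-edit test per adjacent pair.

-- ===== PORT A =====
-- literal port of the nested helper `distance` (one-row Levenshtein DP)
def pvDistance (a b : String) : Int :=
  let al := a.toList
  let bl := b.toList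
  let costs : List Int :=
    (PySem.List.pyRange 0 ((bl.length : Int) + 1) 1).foldl (fun cs j => cs ++ [j]) []
  let costs :=
    (PySem.List.pyRange 1 ((al.length : Int) + 1) 1).foldl (fun costs i =>
      let costs := PySem.List.pySetD costs 0 i
      let nw := i - 1
      let st :=
        (PySem.List.pyRange 1 ((bl.length : Int) + 1) 1).foldl
          (fun (st : List Int × Int) j =>
            let cj := min (1 + min (PySem.List.pyGetD st.1 j 0) (PySem.List.pyGetD st.1 (j - 1) 0))
                          (if PySem.List.pyGetD al (i - 1) ' ' = PySem.List.pyGetD bl (j - 1) ' '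
                           then st.2 else st.2 + 1)
            (PySem.List.pySetD st.1 j cj, PySem.List.pyGetD st.1 j 0))
          (costs, nw)
      st.1) costs
  PySem.List.pyGetD costs (bl.length : Int) 0

def isWordChain (words : List String) : Bool :=
  let t : Int :=
    (PySem.List.pyRange 0 ((words.length : Int) - 1) 1).foldl (fun t i =>
      if pvDistance (PySem.List.pyGetD words i "") (PySem.List.pyGetD words (i + 1) "") = 1
      then t + 0 else t + 1) 0
  if t = 0 then true else false

-- ===== PORT B =====
-- port of Source B's del_one: skip the common prefix, then compare the suffixes
def pvDelOne : List Char → List Char → Bool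
  | x :: s, y :: t => if x = y then pvDelOne s t else decide (x :: s = t)
  | s, t => decide (s = t.drop 1)

-- port of Source B's one_edit
def pvOneEdit (a b : String) : Bool :=
  let al := a.toList
  let bl := b.toList
  if al.length = bl.length then
    decide ((al.zip bl).countP (fun p => p.1 ≠ p.2) = 1)
  else if al.length + 1 = bl.length then pvDelOne al bl
  else if bl.length + 1 = al.length then pvDelOne bl al
  else false

-- all(one_edit(a, b) for a, b in zip(words, words[1:]))
def pvChainAll : List String → Bool
  | a :: b :: rest => pvOneEdit a b && pvChainAll (b :: rest)
  | _ => true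

def isWordChain_alt (words : List String) : Bool := pvChainAll words

-- ===== PRECONDITION & SPEC =====
def Spec_isWordChain (words : List String) (out : Bool) : Prop := out = isWordChain_alt words
instance (words : List String) (out : Bool) : Decidable (Spec_isWordChain words out) := by unfold Spec_isWordChain; infer_instance

-- ===== CLAIM (what is proved, stated in full; the proofs are below) =====
def Claim_equal_isWordChain : Prop := ∀ (words : List String), Dom_isWordChain words → Spec_isWordChain words (isWordChain words)

-- ===== LEMMAS AND PROOFS =====

def pvLev : List Char → List Char → Nat
  | [], b => b.length
  | a, [] => a.length
  | x :: a, y :: b =>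
    min (1 + min (pvLev (x :: a) b) (pvLev a (y :: b)))
        (if x = y then pvLev a b else pvLev a b + 1)
termination_by a b => a.length + b.length
decreasing_by all_goals simp; all_goals omega

theorem pvLev_nil_right (a : List Char) : pvLev a [] = a.length := by
  cases a <;> simp [pvLev]

theorem pvLev_le_ge (a b : List Char) :
    b.length ≤ pvLev a b + a.length ∧ a.length ≤ pvLev a b + b.length := by
  fun_induction pvLev a b with
  | case1 b => simp
  | case2 a h => simp
  | case3 x a y b ih1 ih2 ih3 =>
    by_cases hxy : x = y <;> simp [hxy] at * <;> omega

theorem pvLev_eq_zero (a b : List Char) : pvLev a b = 0 ↔ a = b := by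
  fun_induction pvLev a b with
  | case1 b => simp [List.length_eq_zero_iff, eq_comm]
  | case2 a h => simp [List.length_eq_zero_iff]
  | case3 x a y b ih1 ih2 ih3 =>
    by_cases hxy : x = y
    · simp [hxy]; exact ih3
    · simp [hxy]

theorem pvLev_comm (a b : List Char) : pvLev a b = pvLev b a := by
  fun_induction pvLev a b with
  | case1 b => simp [pvLev_nil_right]
  | case2 a h => cases a with | nil => simp at h | cons z zs => simp [pvLev]
  | case3 x a y b ih1 ih2 ih3 =>
    conv_rhs => rw [pvLev]
    have hxy : (y = x) ↔ (x = y) := ⟨Eq.symm, Eq.symm⟩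
    by_cases h : x = y
    · subst h; simp [ih1, ih2, ih3]; omega
    · simp [h, hxy, ih1, ih2, ih3]; omega

theorem pvLev_cons_self (a : List Char) (y : Char) : pvLev a (y :: a) = 1 := by
  have hle : pvLev a (y :: a) ≤ 1 := by
    cases a with
    | nil => simp [pvLev]
    | cons x s =>
      have h0 : pvLev (x :: s) (x :: s) = 0 := (pvLev_eq_zero _ _).mpr rfl
      rw [pvLev]
      calc min (1 + min (pvLev (x :: s) (x :: s)) (pvLev s (y :: x :: s)))
              (if x = y then pvLev s (x :: s) else pvLev s (x :: s) + 1)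
          ≤ 1 + min (pvLev (x :: s) (x :: s)) (pvLev s (y :: x :: s)) := min_le_left _ _
        _ ≤ 1 + pvLev (x :: s) (x :: s) := by have := min_le_left (pvLev (x :: s) (x :: s)) (pvLev s (y :: x :: s)); omega
        _ = 1 := by rw [h0]
  have hge := pvLev_le_ge a (y :: a)
  simp at hge; omega

def pvHam (a b : List Char) : Nat := (a.zip b).countP (fun p => p.1 ≠ p.2)

theorem pvHam_cons (x y : Char) (a b : List Char) :
    pvHam (x :: a) (y :: b) = (if x = y then 0 else 1) + pvHam a b := by
  by_cases h : x = y <;> simp [pvHam, List.countP_cons, h] <;> omega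

theorem pvHam_eq_zero (a b : List Char) (h : a.length = b.length) :
    pvHam a b = 0 ↔ a = b := by
  induction a generalizing b with
  | nil => cases b with | nil => simp [pvHam] | cons => simp at h
  | cons x s ih =>
    cases b with
    | nil => simp at h
    | cons y t =>
      rw [pvHam_cons]
      by_cases hxy : x = y
      · simp [hxy]; exact ih t (by simpa using h)
      · simp [hxy]

theorem pvHam_append (a b : List Char) (x y : Char) (h : a.length = b.length) :
    pvHam (a ++ [x]) (b ++ [y]) = pvHam a b + (if x = y then 0 else 1) := by
  by_cases hxy : x = y <;>
    simp [pvHam, List.zip_append h, List.countP_append, hxy]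

theorem pvHam_reverse (a b : List Char) (h : a.length = b.length) :
    pvHam a.reverse b.reverse = pvHam a b := by
  induction a generalizing b with
  | nil => cases b with | nil => rfl | cons => simp at h
  | cons x s ih =>
    cases b with
    | nil => simp at h
    | cons y t =>
      have hl : s.length = t.length := by simpa using h
      simp only [List.reverse_cons]
      rw [pvHam_append _ _ _ _ (by simp [hl]), ih t hl, pvHam_cons]
      omega

theorem pvLev_eq_one_iff_ham (a b : List Char) (h : a.length = b.length) :
    pvLev a b = 1 ↔ pvHam a b = 1 := by
  induction a generalizing b with
  | nil => cases b with | nil => simp [pvLev, pvHam] | cons => simp at h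
  | cons x s ih =>
    cases b with
    | nil => simp at h
    | cons y t =>
      have hl : s.length = t.length := by simpa using h
      have g1 := pvLev_le_ge (x :: s) t
      have g2 := pvLev_le_ge s (y :: t)
      rw [pvLev, pvHam_cons]
      by_cases hxy : x = y
      · subst hxy
        have hiff := ih t hl
        simp at g1 g2
        constructor
        · intro he
          have h1 : pvLev s t = 1 := by rw [if_pos rfl] at he; omega
          simp [hiff.mp h1]
        · intro he
          have h1 : pvHam s t = 1 := by simpa using he
          have := hiff.mpr h1
          rw [if_pos rfl]
          omega
      · have hham := pvHam_eq_zero s t hl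
        have hlev := pvLev_eq_zero s t
        simp only [if_neg hxy]
        simp at g1 g2
        constructor
        · intro he
          have h0 : pvLev s t = 0 := by omega
          rw [hham.mpr (hlev.mp h0)]
        · intro he
          have h0 : pvHam s t = 0 := by omega
          rw [hlev.mpr (hham.mp h0)]; omega

theorem pvDelOne_iff (s t : List Char) (h : s.length + 1 = t.length) :
    pvDelOne s t = true ↔ ∃ u c v, s = u ++ v ∧ t = u ++ c :: v := by
  induction s generalizing t with
  | nil =>
    match t, h with
    | [y], _ => simp [pvDelOne]
  | cons x s ih =>
    match t, h with
    | y :: t, h =>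
      have hl : s.length + 1 = t.length := by simpa using h
      rw [pvDelOne]
      by_cases hxy : x = y
      · subst hxy
        rw [if_pos rfl, ih t hl]
        constructor
        · rintro ⟨u, c, v, rfl, rfl⟩
          exact ⟨x :: u, c, v, by simp, by simp⟩
        · rintro ⟨u, c, v, hs, ht⟩
          match u with
          | [] =>
            simp only [List.nil_append] at hs ht
            obtain ⟨hc, hv⟩ := List.cons_eq_cons.mp ht
            subst hv
            exact ⟨[], x, s, by simp, by simp [hs]⟩
          | z :: u =>
            obtain ⟨hz, hs'⟩ := List.cons_eq_cons.mp hs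
            obtain ⟨_, ht'⟩ := List.cons_eq_cons.mp ht
            exact ⟨u, c, v, hs', ht'⟩
      · rw [if_neg hxy]
        simp only [decide_eq_true_eq]
        constructor
        · intro he; exact ⟨[], y, x :: s, by simp, by simp [he]⟩
        · rintro ⟨u, c, v, hs, ht⟩
          match u with
          | [] =>
            simp only [List.nil_append] at hs ht
            obtain ⟨hc, hv⟩ := List.cons_eq_cons.mp ht
            rw [hs, hv]
          | z :: u =>
            obtain ⟨h1, _⟩ := List.cons_eq_cons.mp hs
            obtain ⟨h2, _⟩ := List.cons_eq_cons.mp ht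
            exact absurd (h1.trans h2.symm) hxy

theorem pvDelOne_reverse (s t : List Char) (h : s.length + 1 = t.length) :
    pvDelOne s.reverse t.reverse = pvDelOne s t := by
  have h' : s.reverse.length + 1 = t.reverse.length := by simpa using h
  rw [Bool.eq_iff_iff, pvDelOne_iff _ _ h', pvDelOne_iff _ _ h]
  constructor
  · rintro ⟨u, c, v, hs, ht⟩
    refine ⟨v.reverse, c, u.reverse, ?_, ?_⟩
    · have := congrArg List.reverse hs; simpa using this
    · have := congrArg List.reverse ht; simpa using this
  · rintro ⟨u, c, v, rfl, rfl⟩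
    exact ⟨v.reverse, c, u.reverse, by simp, by simp⟩

theorem pvLev_eq_one_iff_delOne (s t : List Char) (h : s.length + 1 = t.length) :
    pvLev s t = 1 ↔ pvDelOne s t = true := by
  induction s generalizing t with
  | nil =>
    match t, h with
    | [y], _ => simp [pvLev, pvDelOne]
  | cons x s ih =>
    match t, h with
    | y :: t, h =>
      have hl : s.length + 1 = t.length := by simpa using h
      have gu := pvLev_le_ge (x :: s) t
      have gv := pvLev_le_ge s (y :: t)
      have gL := pvLev_le_ge s t
      simp at gu gv gL
      rw [pvLev, pvDelOne]
      by_cases hxy : x = y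
      · subst hxy
        rw [if_pos rfl, if_pos rfl, ← ih t hl]
        have hLu : pvLev (x :: s) t = 0 → pvLev s t = 1 := by
          intro h0
          have : x :: s = t := (pvLev_eq_zero _ _).mp h0
          rw [← this]
          exact pvLev_cons_self s x
        constructor
        · intro he
          by_cases h0 : pvLev (x :: s) t = 0
          · exact hLu h0
          · omega
        · intro he; omega
      · rw [if_neg hxy, if_neg hxy]
        have hiff : pvLev (x :: s) t = 0 ↔ x :: s = t := pvLev_eq_zero _ _
        constructor
        · intro he
          have h0 : pvLev (x :: s) t = 0 := by omega
          simp [hiff.mp h0]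
        · intro he
          have h0 : x :: s = t := by simpa using he
          have := hiff.mpr h0
          omega

def pvRowRec (x : Char) : Int → Int → List Int → List Char → List Int
  | last, nw, c :: cs, y :: ys =>
    let cj := min (1 + min c last) (if x = y then nw else nw + 1)
    cj :: pvRowRec x cj c cs ys
  | _, _, _, _ => []

def pvRowOf (p : List Char) : List Char → List Char → List Int
  | _, [] => []
  | q, y :: ys => ((pvLev p (y :: q) : Int)) :: pvRowOf p (y :: q) ys

theorem pvRowOf_length (p q ys : List Char) : (pvRowOf p q ys).length = ys.length := by
  induction ys generalizing q <;> simp [pvRowOf, *]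

theorem pvRowRec_spec (x : Char) (p : List Char) (ys q : List Char) :
    pvRowRec x (pvLev (x :: p) q) (pvLev p q) (pvRowOf p q ys) ys = pvRowOf (x :: p) q ys := by
  induction ys generalizing q with
  | nil => simp [pvRowOf, pvRowRec]
  | cons y ys ih =>
    rw [pvRowOf, pvRowOf, pvRowRec]
    have hcell : (min (1 + min ((pvLev p (y :: q) : Int)) (pvLev (x :: p) q))
        (if x = y then (pvLev p q : Int) else (pvLev p q : Int) + 1))
        = ((pvLev (x :: p) (y :: q) : Int)) := by
      rw [pvLev]
      by_cases hxy : x = y <;> simp [hxy] <;> push_cast <;> omega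
    simp only [hcell]
    rw [← ih (y :: q)]

theorem pvRowRec_nil (x : Char) (l n : Int) (ys : List Char) : pvRowRec x l n [] ys = [] := by
  cases ys <;> rfl

theorem pvInner_eq (x : Char) (bl : List Char) :
    ∀ (old done : List Int) (nw lastd : Int),
    old.length + done.length = bl.length + 1 →
    done.getLast? = some lastd →
    ((PySem.List.pyRange (done.length : Int) ((bl.length : Int) + 1) 1).foldl
      (fun (st : List Int × Int) j =>
        (PySem.List.pySetD st.1 j
            (min (1 + min (PySem.List.pyGetD st.1 j 0) (PySem.List.pyGetD st.1 (j - 1) 0))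
              (if x = PySem.List.pyGetD bl (j - 1) ' ' then st.2 else st.2 + 1)),
          PySem.List.pyGetD st.1 j 0))
      (done ++ old, nw)).1
    = done ++ pvRowRec x lastd nw old (bl.drop (done.length - 1)) := by
  intro old
  induction old with
  | nil =>
    intro done nw lastd hlen hlast
    rw [PySem.List.pyRange_one_eq_nil (by simp at hlen; omega)]
    simp [pvRowRec_nil]
  | cons c cs ih =>
    intro done nw lastd hlen hlast
    have hd1 : 1 ≤ done.length := by
      cases done with
      | nil => simp at hlast
      | cons => simp
    have hdb : done.length ≤ bl.length := by simp at hlen; omega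
    rw [PySem.List.pyRange_one_cons (by push_cast; omega), List.foldl_cons]
    have e1 : PySem.List.pyGetD (done ++ c :: cs) (done.length : Int) 0 = c := by
      rw [PySem.List.pyGetD_natCast]
      rw [List.getD_append_right _ _ _ _ (le_refl _)]
      simp
    have e2 : PySem.List.pyGetD (done ++ c :: cs) ((done.length : Int) - 1) 0 = lastd := by
      have : ((done.length : Int) - 1) = ((done.length - 1 : Nat) : Int) := by push_cast [hd1]; ring
      rw [this, PySem.List.pyGetD_natCast]
      rw [List.getD_append _ _ _ _ (by omega)]
      rw [List.getD_eq_getElem?_getD, ← List.getLast?_eq_getElem?, hlast]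
      rfl
    have hidx : done.length - 1 < bl.length := by omega
    have e3 : PySem.List.pyGetD bl ((done.length : Int) - 1) ' ' = bl[done.length - 1] := by
      have : ((done.length : Int) - 1) = ((done.length - 1 : Nat) : Int) := by push_cast [hd1]; ring
      rw [this, PySem.List.pyGetD_natCast]
      exact List.getD_eq_getElem _ _ hidx
    have edrop : bl.drop (done.length - 1) = bl[done.length - 1] :: bl.drop done.length := by
      rw [List.drop_eq_getElem_cons hidx]
      have h11 : done.length - 1 + 1 = done.length := by omega
      rw [h11]
    have eset : ∀ (cj : Int), PySem.List.pySetD (done ++ c :: cs) (done.length : Int) cj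
        = (done ++ [cj]) ++ cs := by
      intro cj
      rw [PySem.List.pySetD_natCast]
      rw [List.set_append_right _ _ (le_refl _)]
      simp
    simp only [e1, e2, e3, eset]
    rw [edrop, pvRowRec]
    have hcast : (done.length : Int) + 1
        = (((done ++ [min (1 + min c lastd) (if x = bl[done.length - 1] then nw else nw + 1)]).length : Nat) : Int) := by
      simp
    rw [hcast,
        ih (done ++ [min (1 + min c lastd) (if x = bl[done.length - 1] then nw else nw + 1)]) c
           (min (1 + min c lastd) (if x = bl[done.length - 1] then nw else nw + 1))
           (by simp at hlen ⊢; omega) List.getLast?_concat]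
    simp

theorem pvRowOf_nil_pyRange : ∀ (ys q : List Char),
    pvRowOf [] q ys = PySem.List.pyRange ((q.length : Int) + 1) ((q.length : Int) + (ys.length : Int) + 1) 1 := by
  intro ys
  induction ys with
  | nil => intro q; rw [pvRowOf, PySem.List.pyRange_one_eq_nil (by simp)]
  | cons y ys ih =>
    intro q
    rw [pvRowOf, PySem.List.pyRange_one_cons (by simp only [List.length_cons]; push_cast; omega),
        ih (y :: q)]
    congr 1
    · simp [pvLev]
    · congr 1 <;> simp only [List.length_cons] <;> push_cast <;> ring

theorem pvInitRow (bl : List Char) :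
    PySem.List.pyRange 0 ((bl.length : Int) + 1) 1 = (0 : Int) :: pvRowOf [] [] bl := by
  rw [PySem.List.pyRange_one_cons (by omega), pvRowOf_nil_pyRange]
  norm_num

theorem pvRowOf_getD (p : List Char) : ∀ (ys q : List Char) (k : Nat), k < ys.length →
    (pvRowOf p q ys).getD k 0 = ((pvLev p ((ys.take (k + 1)).reverse ++ q) : Nat) : Int) := by
  intro ys
  induction ys with
  | nil => intro q k hk; simp at hk
  | cons y ys ih =>
    intro q k hk
    cases k with
    | zero => simp [pvRowOf]
    | succ k =>
      rw [pvRowOf]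
      have : (pvRowOf p (y :: q) ys).getD k 0
          = ((pvLev p ((ys.take (k + 1)).reverse ++ (y :: q)) : Nat) : Int) :=
        ih (y :: q) k (by simpa using hk)
      simp only [List.getD_cons_succ, this, List.take_succ_cons, List.reverse_cons]
      rw [List.append_assoc]
      rfl

theorem pvOuter (al bl : List Char) : ∀ (xs p : List Char), al = p.reverse ++ xs →
    (PySem.List.pyRange ((p.length : Int) + 1) ((al.length : Int) + 1) 1).foldl
      (fun costs i =>
        (List.foldl
            (fun (st : List Int × Int) j =>
              (PySem.List.pySetD st.1 j
                  (min (1 + min (PySem.List.pyGetD st.1 j 0) (PySem.List.pyGetD st.1 (j - 1) 0))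
                    (if PySem.List.pyGetD al (i - 1) ' ' = PySem.List.pyGetD bl (j - 1) ' ' then st.2
                    else st.2 + 1)),
                PySem.List.pyGetD st.1 j 0))
            (PySem.List.pySetD costs 0 i, i - 1) (PySem.List.pyRange 1 ((bl.length : Int) + 1) 1)).1)
      (((p.length : Nat) : Int) :: pvRowOf p [] bl)
    = ((al.length : Int) :: pvRowOf al.reverse [] bl) := by
  intro xs
  induction xs with
  | nil =>
    intro p hp
    have h1 : al.length = p.length := by rw [hp]; simp
    have h2 : al.reverse = p := by rw [hp]; simp
    rw [PySem.List.pyRange_one_eq_nil (a := (p.length : Int) + 1) (b := (al.length : Int) + 1) (by omega), List.foldl_nil, h1, h2]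
  | cons x xs ih =>
    intro p hp
    have hplt : p.length < al.length := by rw [hp]; simp
    rw [PySem.List.pyRange_one_cons (a := (p.length : Int) + 1) (b := (al.length : Int) + 1) (by push_cast; omega), List.foldl_cons]
    -- evaluate the row body at i = p.length + 1
    have hset : PySem.List.pySetD (((p.length : Nat) : Int) :: pvRowOf p [] bl) 0 ((p.length : Int) + 1)
        = [((p.length : Int) + 1)] ++ pvRowOf p [] bl := by
      rw [show (0 : Int) = ((0 : Nat) : Int) from rfl, PySem.List.pySetD_natCast]
      rfl
    have hx : PySem.List.pyGetD al ((p.length : Int) + 1 - 1) ' ' = x := by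
      have : (p.length : Int) + 1 - 1 = ((p.length : Nat) : Int) := by ring
      rw [this, PySem.List.pyGetD_natCast, hp]
      rw [List.getD_append_right _ _ _ _ (by simp)]
      simp
    rw [hset, hx]
    have hinner := pvInner_eq x bl (pvRowOf p [] bl) [((p.length : Int) + 1)]
      ((p.length : Int) + 1 - 1) ((p.length : Int) + 1)
      (by simp [pvRowOf_length]) rfl
    simp only [List.length_singleton, Nat.cast_one, List.drop_zero, Nat.sub_self] at hinner
    rw [hinner]
    have hrow : pvRowRec x ((p.length : Int) + 1) ((p.length : Int) + 1 - 1) (pvRowOf p [] bl) bl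
        = pvRowOf (x :: p) [] bl := by
      have e0 : ((p.length : Int) + 1 - 1) = ((pvLev p [] : Nat) : Int) := by
        rw [pvLev_nil_right]; push_cast; ring
      have e1 : ((p.length : Int) + 1) = ((pvLev (x :: p) [] : Nat) : Int) := by
        rw [pvLev_nil_right]; simp only [List.length_cons]; push_cast; omega
      rw [e0, e1]
      exact pvRowRec_spec x p bl []
    rw [hrow]
    have hcons : ([((p.length : Int) + 1)] : List Int) ++ pvRowOf (x :: p) [] bl
        = (((x :: p).length : Nat) : Int) :: pvRowOf (x :: p) [] bl := by
      simp only [List.singleton_append, List.length_cons]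
      norm_cast
    have hstart : ((p.length : Int) + 1) + 1 = (((x :: p).length : Nat) : Int) + 1 := by
      simp only [List.length_cons]; push_cast; ring
    rw [hcons, hstart, ih (x :: p) (by rw [hp]; simp)]

theorem pvDistance_eq (a b : String) :
    pvDistance a b = (pvLev a.toList.reverse b.toList.reverse : Int) := by
  have hout := pvOuter a.toList b.toList a.toList [] (by simp)
  simp only [List.length_nil, Nat.cast_zero, zero_add] at hout
  simp only [pvDistance]
  rw [PySem.List.foldl_append_singleton, List.nil_append, pvInitRow, hout]
  by_cases h0 : b.toList.length = 0
  · have hbnil : b.toList = [] := List.eq_nil_of_length_eq_zero h0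
    rw [h0, hbnil]
    simp [pvLev_nil_right]
  · have hlen1 : 1 ≤ b.toList.length := by omega
    have hcast : ((b.toList.length : Nat) : Int) = (((b.toList.length - 1 : Nat) + 1 : Nat) : Int) := by
      push_cast [hlen1]; omega
    rw [hcast, PySem.List.pyGetD_natCast, List.getD_cons_succ]
    have hk : b.toList.length - 1 < b.toList.length := by omega
    rw [pvRowOf_getD a.toList.reverse b.toList [] (b.toList.length - 1) hk]
    have : b.toList.take (b.toList.length - 1 + 1) = b.toList := by
      rw [show b.toList.length - 1 + 1 = b.toList.length from by omega]
      exact List.take_length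
    rw [this, List.append_nil]

theorem pvOneEdit_iff (a b : String) : (pvDistance a b = 1) ↔ pvOneEdit a b = true := by
  rw [pvDistance_eq]
  have hcast : ((pvLev a.toList.reverse b.toList.reverse : Nat) : Int) = 1
      ↔ pvLev a.toList.reverse b.toList.reverse = 1 := by omega
  rw [hcast]
  unfold pvOneEdit
  by_cases h1 : a.toList.length = b.toList.length
  · rw [if_pos h1]
    rw [pvLev_eq_one_iff_ham _ _ (by simp [h1]), pvHam_reverse _ _ h1]
    simp [pvHam]
  · rw [if_neg h1]
    by_cases h2 : a.toList.length + 1 = b.toList.length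
    · rw [if_pos h2]
      rw [pvLev_eq_one_iff_delOne _ _ (by simp [← h2]), pvDelOne_reverse _ _ h2]
    · rw [if_neg h2]
      by_cases h3 : b.toList.length + 1 = a.toList.length
      · rw [if_pos h3]
        rw [pvLev_comm, pvLev_eq_one_iff_delOne _ _ (by simp [← h3]), pvDelOne_reverse _ _ h3]
      · rw [if_neg h3]
        have hg := pvLev_le_ge a.toList.reverse b.toList.reverse
        simp only [List.length_reverse] at hg
        simp only [Bool.false_eq_true, iff_false]
        omega

def pvBad : List String → Int
  | a :: b :: rest => (if pvDistance a b = 1 then 0 else 1) + pvBad (b :: rest)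
  | _ => 0

theorem pvBad_nonneg (ws : List String) : 0 ≤ pvBad ws := by
  induction ws with
  | nil => simp [pvBad]
  | cons a ws ih =>
    cases ws with
    | nil => simp [pvBad]
    | cons b r =>
      rw [pvBad]
      split_ifs <;> omega

theorem pvBad_eq_zero (ws : List String) : pvBad ws = 0 ↔ pvChainAll ws = true := by
  induction ws with
  | nil => simp [pvBad, pvChainAll]
  | cons a ws ih =>
    cases ws with
    | nil => simp [pvBad, pvChainAll]
    | cons b r =>
      rw [pvBad, pvChainAll]
      have hnn := pvBad_nonneg (b :: r)
      rw [Bool.and_eq_true, ← ih, ← pvOneEdit_iff]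
      split_ifs with hd
      · simp [hd]
      · simp [hd]
        omega

theorem pvShift1 (a : String) (l : List String) (k : Nat) (d : String) :
    PySem.List.pyGetD (a :: l) ((k : Int) + 1) d = PySem.List.pyGetD l (k : Int) d := by
  have h : ((k : Int) + 1) = ((k + 1 : Nat) : Int) := by push_cast; ring
  rw [h, PySem.List.pyGetD_natCast, PySem.List.pyGetD_natCast]
  simp

theorem pvShift2 (a : String) (l : List String) (k : Nat) (d : String) :
    PySem.List.pyGetD (a :: l) ((k : Int) + 1 + 1) d = PySem.List.pyGetD l ((k : Int) + 1) d := by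
  have h : ((k : Int) + 1 + 1) = ((k + 2 : Nat) : Int) := by push_cast; ring
  have h' : ((k : Int) + 1) = ((k + 1 : Nat) : Int) := by push_cast; ring
  rw [h, h', PySem.List.pyGetD_natCast, PySem.List.pyGetD_natCast]
  simp

theorem pvFoldNat : ∀ (ws : List String) (t : Int),
    (List.range (ws.length - 1)).foldl
      (fun (t : Int) (k : Nat) => if pvDistance (PySem.List.pyGetD ws (k : Int) "") (PySem.List.pyGetD ws ((k : Int) + 1) "") = 1
                  then t + 0 else t + 1) t
    = t + pvBad ws := by
  intro ws
  induction ws with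
  | nil => intro t; simp [pvBad]
  | cons a ws ih =>
    cases ws with
    | nil => intro t; simp [pvBad]
    | cons b r =>
      intro t
      have hlen : (a :: b :: r).length - 1 = (b :: r).length := by simp
      rw [hlen, List.length_cons, List.range_succ_eq_map, List.foldl_cons, List.foldl_map]
      have hfun : (fun (x : Int) (y : Nat) =>
            if pvDistance (PySem.List.pyGetD (a :: b :: r) ((y : Int) + 1) "")
                (PySem.List.pyGetD (a :: b :: r) ((y : Int) + 1 + 1) "") = 1
            then x + 0 else x + 1)
          = (fun (x : Int) (y : Nat) =>
            if pvDistance (PySem.List.pyGetD (b :: r) ((y : Int)) "")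
                (PySem.List.pyGetD (b :: r) ((y : Int) + 1) "") = 1
            then x + 0 else x + 1) := by
        funext x y
        rw [pvShift2 a (b :: r) y, pvShift1 a (b :: r) y]
      simp only [Nat.cast_succ]
      rw [hfun, pvShift1 a (b :: r) 0]
      simp only [Nat.cast_zero, PySem.List.pyGetD_zero_cons]
      have ih' := ih (if pvDistance a b = 1 then t + 0 else t + 1)
      rw [show (b :: r).length - 1 = r.length from by simp] at ih'
      rw [ih', pvBad]
      split_ifs <;> omega

theorem pvFold_eq (ws : List String) (t : Int) :
    (PySem.List.pyRange 0 ((ws.length : Int) - 1) 1).foldl (fun t i =>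
      if pvDistance (PySem.List.pyGetD ws i "") (PySem.List.pyGetD ws (i + 1) "") = 1
      then t + 0 else t + 1) t = t + pvBad ws := by
  cases ws with
  | nil =>
    rw [PySem.List.pyRange_one_eq_nil (by simp)]
    simp [pvBad]
  | cons a l =>
    have h1 : (((a :: l).length : Int) - 1) = ((l.length : Nat) : Int) := by
      simp
    rw [h1, PySem.List.pyRange_zero_natCast, List.foldl_map]
    have h2 := pvFoldNat (a :: l) t
    rw [show (a :: l).length - 1 = l.length from by simp] at h2
    exact h2

-- ===== VERDICT (by name: the statement is the Claim_ definition above) =====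
theorem isWordChain_spec : Claim_equal_isWordChain := by
  intro words _
  show isWordChain words = isWordChain_alt words
  simp only [isWordChain, isWordChain_alt]
  rw [pvFold_eq, zero_add]
  by_cases hb : pvBad words = 0
  · rw [if_pos hb, (pvBad_eq_zero words).mp hb]
  · rw [if_neg hb]
    cases hcb : pvChainAll words with
    | false => rfl
    | true => exact absurd ((pvBad_eq_zero words).mpr hcb) hb
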